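-- pv_equiv track=rewrite | github.com/c10q/algorithm | python/kakao_blind_2023/ps4.py | get_binary_count_by_height
-- ===== SOURCE A (Python) =====
-- def get_binary_count_by_height(n):
--     b = len(binary(n))
--     x = 1
--     nodes = 1
--     while True:
--         if b <= nodes:
--             return [nodes, x]
--         nodes += 2 ** x
--         x += 1
--
-- def binary(n):
--     return str(bin(n)[2:])
-- ===== SOURCE B (Python) =====
-- def binary(n):
--     return str(bin(n)[2:])
--
-- def get_binary_count_by_height(n):
--     b = len(binary(n))
--     x = b.bit_length()
--     return [2 ** x - 1, x]
-- ===== Notes on version B (the rewrite author's own statement) =====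
-- stated objective: simpler
-- what changed: the accumulation loop searching the smallest full-tree height whose node count covers b is replaced by the closed form x = b.bit_length(), so there is no loop at all
import Mathlib
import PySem

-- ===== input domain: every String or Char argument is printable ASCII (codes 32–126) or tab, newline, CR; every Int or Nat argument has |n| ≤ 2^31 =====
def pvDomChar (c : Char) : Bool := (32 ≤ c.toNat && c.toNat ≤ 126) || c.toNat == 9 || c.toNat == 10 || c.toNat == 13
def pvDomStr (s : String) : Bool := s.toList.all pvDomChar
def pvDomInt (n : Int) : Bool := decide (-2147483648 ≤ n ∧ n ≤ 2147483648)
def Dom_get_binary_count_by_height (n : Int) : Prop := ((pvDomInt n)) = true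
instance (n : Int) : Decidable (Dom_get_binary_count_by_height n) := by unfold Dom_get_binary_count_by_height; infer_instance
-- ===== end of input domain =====

-- B replaces A's height-search loop by the closed form x = b.bit_length(); objective: simpler.

-- ===== PORT A =====
-- helper binary(n) = str(bin(n)[2:]); str() on a str is the identity
def pyBinary (n : Int) : String := PySem.Str.slice (PySem.Int.pyBin n) (some 2) none

-- the 'while True' loop of A: state (nodes, x); terminates because nodes strictly grows
def pyLoopA (b : Int) (nodes : Int) (x : Int) : List Int :=
  if b ≤ nodes then [nodes, x]
  else pyLoopA b (nodes + 2 ^ x.toNat) (x + 1)   -- 2 ** x with x ≥ 1 in Python; exact for x ≥ 0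
termination_by (b - nodes).toNat
decreasing_by
  have h2 : (0:Int) < 2 ^ x.toNat := by positivity
  omega

def get_binary_count_by_height (n : Int) : List Int :=
  pyLoopA (PySem.Str.len (pyBinary n)) 1 1

-- ===== PORT B =====
def get_binary_count_by_height_alt (n : Int) : List Int :=
  let b : Int := PySem.Str.len (pyBinary n)
  let x : Int := (PySem.Int.bitLength b : Int)   -- b.bit_length()
  [2 ^ x.toNat - 1, x]

-- ===== PRECONDITION & SPEC =====
def Spec_get_binary_count_by_height (n : Int) (out : List Int) : Prop := out = get_binary_count_by_height_alt n
instance (n : Int) (out : List Int) : Decidable (Spec_get_binary_count_by_height n out) := by unfold Spec_get_binary_count_by_height; infer_instance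

-- ===== CLAIM (what is proved, stated in full; the proofs are below) =====
def Claim_equal_get_binary_count_by_height : Prop := ∀ (n : Int), Dom_get_binary_count_by_height n → Spec_get_binary_count_by_height n (get_binary_count_by_height n)

-- ===== LEMMAS AND PROOFS =====

-- Nat.toDigits is never empty
theorem pv_toDigitsCore_len_pos (f n : Nat) (hf : 0 < f) :
    1 ≤ (Nat.toDigitsCore 2 f n []).length := by
  cases f with
  | zero => omega
  | succ f =>
    rw [Nat.toDigitsCore]
    by_cases h : n / 2 = 0
    · simp [h]
    · simp only [h, if_false]
      rw [Nat.toDigitsCore_lens_eq]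
      omega

-- b = len(bin(n)[2:]) lies in [1, 33] for |n| ≤ 2^31
theorem pv_len_pyBinary_bounds (n : Int) (h : n.natAbs < 2 ^ 32) :
    1 ≤ PySem.Str.len (pyBinary n) ∧ PySem.Str.len (pyBinary n) ≤ 33 := by
  have hlen : (pyBinary n).toList = (PySem.Int.toBinChars0b n).drop 2 := by
    rw [pyBinary, PySem.Str.toList_slice, PySem.Chars.slice_eq_listSlice,
        PySem.Int.toList_pyBin, PySem.List.slice_from _ (by norm_num)]
    congr 1
  have hdig_pos : 1 ≤ (Nat.toDigits 2 n.natAbs).length :=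
    pv_toDigitsCore_len_pos _ _ (by omega)
  have hdig_le : (Nat.toDigits 2 n.natAbs).length ≤ 32 :=
    Nat.toDigits_length 2 n.natAbs 32 (by norm_num) h
  rw [PySem.Str.len_eq, hlen, PySem.Int.toBinChars0b]
  by_cases hn : n < 0
  · simp only [hn, if_true, List.drop_succ_cons, List.drop_zero, List.length_cons]
    omega
  · have habs : n.toNat = n.natAbs := by omega
    simp only [hn, if_false, List.drop_succ_cons, List.drop_zero, habs]
    omega

-- loop invariant: at state (2^e - 1, e) with 2^(e-1) ≤ b, the loop returns
-- [2^L - 1, L] with L = bitLength b; induction on the remaining height budget k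
theorem pv_loop_aux (k : Nat) (b : Int) (e : Nat) (he : 1 ≤ e)
    (hlo : (2 : Nat) ^ (e - 1) ≤ b.natAbs) (hb : 0 < b)
    (hk : PySem.Int.bitLength b ≤ e + k) :
    pyLoopA b (2 ^ e - 1) (e : Int) =
      [2 ^ (PySem.Int.bitLength b) - 1, (PySem.Int.bitLength b : Int)] := by
  induction k generalizing e with
  | zero =>
    rw [pyLoopA]
    have hL : PySem.Int.bitLength b = e := by
      have h1 := PySem.Int.lt_two_pow_bitLength b
      have h2 := PySem.Int.two_pow_bitLength_le b (by omega)
      by_contra hne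
      rcases Nat.lt_or_ge (PySem.Int.bitLength b) e with hlt | hge
      · have : (2:Nat) ^ PySem.Int.bitLength b ≤ 2 ^ (e - 1) :=
          Nat.pow_le_pow_right (by norm_num) (by omega)
        omega
      · have : (2:Nat) ^ e ≤ 2 ^ (PySem.Int.bitLength b - 1) :=
          Nat.pow_le_pow_right (by norm_num) (by omega)
        omega
    have hble : b ≤ 2 ^ e - 1 := by
      have h1 := PySem.Int.lt_two_pow_bitLength b
      rw [hL] at h1
      have hcast : ((2 ^ e : Nat) : Int) = 2 ^ e := by push_cast; ring
      omega
    rw [if_pos hble, hL]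
  | succ k ih =>
    rw [pyLoopA]
    by_cases hble : b ≤ 2 ^ e - 1
    · have hL : PySem.Int.bitLength b = e := by
        have h1 := PySem.Int.lt_two_pow_bitLength b
        have h2 := PySem.Int.two_pow_bitLength_le b (by omega)
        have hcast : ((2 ^ e : Nat) : Int) = 2 ^ e := by push_cast; ring
        have hup : b.natAbs < 2 ^ e := by omega
        by_contra hne
        rcases Nat.lt_or_ge (PySem.Int.bitLength b) e with hlt | hge
        · have : (2:Nat) ^ PySem.Int.bitLength b ≤ 2 ^ (e - 1) :=
            Nat.pow_le_pow_right (by norm_num) (by omega)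
          omega
        · have : (2:Nat) ^ e ≤ 2 ^ (PySem.Int.bitLength b - 1) :=
            Nat.pow_le_pow_right (by norm_num) (by omega)
          omega
      rw [if_pos hble, hL]
    · rw [if_neg hble]
      have htn : ((e : Int)).toNat = e := by omega
      have hstep : (2:Int) ^ e - 1 + 2 ^ ((e : Int)).toNat = 2 ^ (e + 1) - 1 := by
        rw [htn]; ring
      have hlo' : (2:Nat) ^ (e + 1 - 1) ≤ b.natAbs := by
        have hcast : ((2 ^ e : Nat) : Int) = 2 ^ e := by push_cast; ring
        simp only [Nat.add_sub_cancel]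
        omega
      have hk' : PySem.Int.bitLength b ≤ (e + 1) + k := by omega
      have hcast : ((e : Int)) + 1 = ((e + 1 : Nat) : Int) := by push_cast; ring
      rw [hstep, hcast]
      exact ih (e + 1) (by omega) hlo' hk'

-- ===== VERDICT (by name: the statement is the Claim_ definition above) =====
theorem get_binary_count_by_height_spec : Claim_equal_get_binary_count_by_height := by
  intro n hdom
  have hd : n.natAbs < 2 ^ 32 := by
    simp only [Dom_get_binary_count_by_height, pvDomInt, decide_eq_true_eq] at hdom
    omega
  obtain ⟨h1, h2⟩ := pv_len_pyBinary_bounds n hd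
  show get_binary_count_by_height n = get_binary_count_by_height_alt n
  rw [get_binary_count_by_height, get_binary_count_by_height_alt]
  set b : Int := PySem.Str.len (pyBinary n) with hbdef
  have hloop := pv_loop_aux (PySem.Int.bitLength b) b 1 (by omega)
    (by norm_num; omega) (by omega) (by omega)
  have e1 : (2:Int) ^ 1 - 1 = 1 := by norm_num
  have e2 : ((1:Nat) : Int) = 1 := by norm_num
  rw [e1, e2] at hloop
  simp only [hloop, Int.toNat_natCast]
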